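-- pv_equiv track=rewrite | github.com/Zhaoyilunnn/quantum-computing-resources | qvm/util.py | partition_graph
-- ===== SOURCE A (Python) =====
-- def partition_graph(graph, subgraph_size):
--     visited = [False] * len(graph)
--     subgraphs = []
--     num_nodes = len(graph)
--     subgraph_count = num_nodes // subgraph_size
--
--     # Create subgraphs
--     for i in range(subgraph_count):
--         start_node = i * subgraph_size
--         subgraph = []
--         while start_node < num_nodes and visited[start_node]:
--             start_node += 1
--         if start_node == num_nodes:
--             break
--         dfs(start_node, graph, visited, subgraph, subgraph_size)
--         subgraphs.append(subgraph)
--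
--     # Handle any remaining nodes that were not partitioned
--     remaining_nodes = [i for i in range(num_nodes) if not visited[i]]
--     remaining_index = 0
--     for i in range(len(subgraphs)):
--         while len(subgraphs[i]) < subgraph_size and remaining_index < len(remaining_nodes):
--             node = remaining_nodes[remaining_index]
--             if all(n in subgraphs[i] for n in graph[node]):
--                 subgraphs[i].append(node)
--                 visited[node] = True
--                 remaining_index += 1
--             else:
--                 remaining_index += 1
--
--     return subgraphs
--
-- def dfs(node, graph, visited, subgraph, subgraph_size):
--     visited[node] = True
--     subgraph.append(node)
--     if len(subgraph) == subgraph_size: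
--         return
--     for neighbor in graph[node]:
--         if not visited[neighbor] and len(subgraph) < subgraph_size and all(n in subgraph for n in graph[neighbor]):
--             dfs(neighbor, graph, visited, subgraph, subgraph_size)
-- ===== SOURCE B (Python) =====
-- def partition_graph(graph, subgraph_size):
--     n = len(graph)
--     visited = [False] * n
--     subgraphs = []
--     for i in range(n // subgraph_size):
--         start = i * subgraph_size
--         while start < n and visited[start]:
--             start += 1
--         if start == n:
--             break
--         # iterative DFS with an explicit (node, next-neighbour-index) stack
--         visited[start] = True
--         subgraph = [start]
--         stack = [(start, 0)]
--         while stack and len(subgraph) < subgraph_size: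
--             node, idx = stack[-1]
--             nbrs = graph[node]
--             if idx == len(nbrs):
--                 stack.pop()
--                 continue
--             stack[-1] = (node, idx + 1)
--             nb = nbrs[idx]
--             if not visited[nb] and all(m in subgraph for m in graph[nb]):
--                 visited[nb] = True
--                 subgraph.append(nb)
--                 stack.append((nb, 0))
--         subgraphs.append(subgraph)
--
--     # single pass over the leftover nodes, advancing a subgraph pointer
--     remaining = [i for i in range(n) if not visited[i]]
--     j = 0
--     for node in remaining:
--         while j < len(subgraphs) and len(subgraphs[j]) >= subgraph_size:
--             j += 1
--         if j == len(subgraphs):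
--             break
--         if all(m in subgraphs[j] for m in graph[node]):
--             subgraphs[j].append(node)
--     return subgraphs
-- ===== Notes on version B (the rewrite author's own statement) =====
-- stated objective: alternative
-- what changed: The recursive DFS helper is inlined into partition_graph as an iterative DFS over an explicit (node, next-neighbour-index) stack that re-checks visitedness and the all-neighbours-in-subgraph test as each neighbour is reached, and the remaining-nodes fix-up is restructured from a per-subgraph loop consuming a shared index into a single pass over the leftover nodes advancing a subgraph pointer.
-- outside the precondition, e.g. on partition_graph([[1], [0], [99]], 3): A returns [[0, 1]], B returns [[0, 1]]
import Mathlib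
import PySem

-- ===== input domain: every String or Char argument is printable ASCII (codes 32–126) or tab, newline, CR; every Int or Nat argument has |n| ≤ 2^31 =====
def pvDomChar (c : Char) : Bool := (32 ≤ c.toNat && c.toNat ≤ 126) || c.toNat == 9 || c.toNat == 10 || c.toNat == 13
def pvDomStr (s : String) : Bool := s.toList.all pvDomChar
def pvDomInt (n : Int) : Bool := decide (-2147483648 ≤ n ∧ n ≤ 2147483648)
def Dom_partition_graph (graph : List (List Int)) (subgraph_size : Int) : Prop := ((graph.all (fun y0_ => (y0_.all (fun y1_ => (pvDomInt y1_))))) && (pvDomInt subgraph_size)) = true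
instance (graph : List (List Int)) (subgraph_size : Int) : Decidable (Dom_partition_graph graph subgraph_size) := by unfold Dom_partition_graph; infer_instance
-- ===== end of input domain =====

-- B inlines A's recursive DFS as an iterative DFS over an explicit (node, next-neighbour-index)
-- stack and replaces the per-subgraph fix-up loop by a single pass over the leftover nodes
-- (objective: alternative decomposition, same cost). Return-value equivalence only; neither
-- program mutates its arguments.

-- ===== PORT A =====
-- shared tiny accessors (graph[node], visited[i], visited[i]=True, all(n in s for n in graph[nb]))
def pvRow (g : List (List Int)) (node : Int) : List Int := PySem.List.pyGetD g node []
def pvVis (v : List Bool) (i : Int) : Bool := PySem.List.pyGetD v i false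
def pvMark (v : List Bool) (i : Int) : List Bool := PySem.List.pySetD v i true
def pvAllIn (g : List (List Int)) (s : List Int) (nb : Int) : Bool := (pvRow g nb).all (fun m => s.contains m)

-- dfs(node, graph, visited, subgraph, subgraph_size); fuel g.length+1 bounds the recursion depth
def pvDfsA (g : List (List Int)) (k : Int) : Nat → Int → List Bool → List Int → List Bool × List Int
  | 0, _, v, s => (v, s)
  | f+1, node, v, s =>
    let v1 := pvMark v node
    let s1 := s ++ [node]
    if (s1.length : Int) = k then (v1, s1)
    else
      (pvRow g node).foldl
        (fun st nb =>
          if pvVis st.1 nb = false ∧ (st.2.length : Int) < k ∧ pvAllIn g st.2 nb = true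
          then pvDfsA g k f nb st.1 st.2 else st) (v1, s1)

-- while start_node < num_nodes and visited[start_node]: start_node += 1
def pvFindA (v : List Bool) (start : Int) : Int :=
  if _h : start < (v.length : Int) ∧ pvVis v start = true then pvFindA v (start + 1) else start
termination_by ((v.length : Int) - start).toNat
decreasing_by omega

-- for i in range(subgraph_count): … (break returns early)
def pvOuterA (g : List (List Int)) (k : Int) : List Int → List Bool → List (List Int) → List Bool × List (List Int)
  | [], v, subs => (v, subs)
  | i :: rest, v, subs =>
    let start := pvFindA v (i * k)
    if start = (g.length : Int) then (v, subs)
    else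
      let st := pvDfsA g k (g.length + 1) start v []
      pvOuterA g k rest st.1 (subs ++ [st.2])

-- inner while of the fix-up loop: consume remaining nodes for one subgraph
def pvFillA (g : List (List Int)) (k : Int) (sg : List Int) : List Int → List Int × List Int
  | [] => (sg, [])
  | node :: rest =>
    if (sg.length : Int) < k then
      if pvAllIn g sg node = true then pvFillA g k (sg ++ [node]) rest
      else pvFillA g k sg rest
    else (sg, node :: rest)

-- for i in range(len(subgraphs)): … threading remaining_index
def pvFixA (g : List (List Int)) (k : Int) : List (List Int) → List Int → List (List Int)
  | [], _ => []
  | sg :: rest, rem =>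
    let p := pvFillA g k sg rem
    p.1 :: pvFixA g k rest p.2

def partition_graph (graph : List (List Int)) (subgraph_size : Int) : List (List Int) :=
  let n := graph.length
  let cnt := PySem.Int.floordiv (n : Int) subgraph_size
  let r := pvOuterA graph subgraph_size (PySem.List.pyRange 0 cnt 1) (List.replicate n false) []
  let remaining := (PySem.List.pyRange 0 (n : Int) 1).filter (fun i => pvVis r.1 i = false)
  pvFixA graph subgraph_size r.2 remaining

-- ===== PORT B =====
-- iterative DFS: explicit stack of (node, next-neighbour-index) frames
def pvDfsB (g : List (List Int)) (k : Int) : Nat → List (Int × Nat) → List Bool → List Int → List Bool × List Int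
  | 0, _, v, s => (v, s)
  | _+1, [], v, s => (v, s)
  | f+1, (node, i) :: rest, v, s =>
    if (s.length : Int) < k then
      let nbrs := pvRow g node
      if i = nbrs.length then pvDfsB g k f rest v s
      else
        let nb := nbrs.getD i 0
        if pvVis v nb = false ∧ pvAllIn g s nb = true
        then pvDfsB g k f ((nb, 0) :: (node, i + 1) :: rest) (pvMark v nb) (s ++ [nb])
        else pvDfsB g k f ((node, i + 1) :: rest) v s
    else (v, s)

def pvDeg (g : List (List Int)) : Nat := g.foldr (fun r m => max r.length m) 0
-- enough fuel for the stack loop (each iteration pops, advances an index, or marks a node)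
def pvFuelB (g : List (List Int)) : Nat := (g.length + 2) * (pvDeg g + 2)

def pvFindB (v : List Bool) (start : Int) : Int :=
  if _h : start < (v.length : Int) ∧ pvVis v start = true then pvFindB v (start + 1) else start
termination_by ((v.length : Int) - start).toNat
decreasing_by omega

def pvOuterB (g : List (List Int)) (k : Int) : List Int → List Bool → List (List Int) → List Bool × List (List Int)
  | [], v, subs => (v, subs)
  | i :: rest, v, subs =>
    let start := pvFindB v (i * k)
    if start = (g.length : Int) then (v, subs)
    else
      let st := pvDfsB g k (pvFuelB g) [(start, 0)] (pvMark v start) [start]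
      pvOuterB g k rest st.1 (subs ++ [st.2])

-- while j < len(subgraphs) and len(subgraphs[j]) >= subgraph_size: j += 1
def pvSkip (k : Int) : List (List Int) → List (List Int) → List (List Int) × List (List Int)
  | done, [] => (done, [])
  | done, sg :: t => if k ≤ (sg.length : Int) then pvSkip k (done ++ [sg]) t else (done, sg :: t)

-- single pass over the leftover nodes, advancing the subgraph pointer
def pvFixB (g : List (List Int)) (k : Int) : List Int → List (List Int) → List (List Int) → List (List Int)
  | [], done, todo => done ++ todo
  | node :: rest, done, todo =>
    let p := pvSkip k done todo
    match p.2 with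
    | [] => p.1
    | sg :: t =>
      if pvAllIn g sg node = true then pvFixB g k rest p.1 ((sg ++ [node]) :: t)
      else pvFixB g k rest p.1 (sg :: t)

def partition_graph_alt (graph : List (List Int)) (subgraph_size : Int) : List (List Int) :=
  let n := graph.length
  let r := pvOuterB graph subgraph_size (PySem.List.pyRange 0 (PySem.Int.floordiv (n : Int) subgraph_size) 1) (List.replicate n false) []
  let remaining := (PySem.List.pyRange 0 (n : Int) 1).filter (fun i => pvVis r.1 i = false)
  pvFixB graph subgraph_size remaining [] r.2

-- ===== PRECONDITION & SPEC =====
-- Pre_ excludes the inputs on which A raises: subgraph_size = 0 (ZeroDivisionError) and, for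
-- positive subgraph_size, neighbour ids outside [-len(graph), len(graph)) (IndexError when the
-- dfs dereferences them); being closed-form it also leaves out the rare returning inputs whose
-- out-of-range ids are never dereferenced (nodes the dfs never enters, whose ids the fix-up
-- loop only compares, never indexes).
def Pre_partition_graph (graph : List (List Int)) (subgraph_size : Int) : Prop :=
  subgraph_size ≠ 0 ∧ (subgraph_size < 0 ∨ subgraph_size = 1 ∨
    ∀ row ∈ graph, ∀ x ∈ row, -(graph.length : Int) ≤ x ∧ x < (graph.length : Int))
instance (graph : List (List Int)) (subgraph_size : Int) : Decidable (Pre_partition_graph graph subgraph_size) := by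
  unfold Pre_partition_graph; infer_instance

def pvWitness_partition_graph : List (List Int) × Int := ([[1], [0], [3], [2, 0]], 2)

def Spec_partition_graph (graph : List (List Int)) (subgraph_size : Int) (out : List (List Int)) : Prop := out = partition_graph_alt graph subgraph_size
instance (graph : List (List Int)) (subgraph_size : Int) (out : List (List Int)) : Decidable (Spec_partition_graph graph subgraph_size out) := by unfold Spec_partition_graph; infer_instance

-- ===== CLAIM (what is proved, stated in full; the proofs are below) =====
def Claim_equal_partition_graph : Prop := ∀ (graph : List (List Int)) (subgraph_size : Int), Dom_partition_graph graph subgraph_size → Pre_partition_graph graph subgraph_size → Spec_partition_graph graph subgraph_size (partition_graph graph subgraph_size)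

-- ===== LEMMAS AND PROOFS =====

-- adjacency lists whose every entry is a valid node id
def pvGood (g : List (List Int)) : Prop := ∀ row ∈ g, ∀ x ∈ row, -(g.length : Int) ≤ x ∧ x < (g.length : Int)

-- the for-loop body of A's dfs, at fuel f (proof-side name for the lambda inside pvDfsA)
def pvBody (g : List (List Int)) (k : Int) (f : Nat) : (List Bool × List Int) → Int → (List Bool × List Int) :=
  fun st nb =>
    if pvVis st.1 nb = false ∧ (st.2.length : Int) < k ∧ pvAllIn g st.2 nb = true
    then pvDfsA g k f nb st.1 st.2 else st

-- A's dfs after entering node, restarted at neighbour index i, with the canonical fuel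
def pvNF (g : List (List Int)) (k : Int) (node : Int) (i : Nat) (st : List Bool × List Int) : List Bool × List Int :=
  ((pvRow g node).drop i).foldl (pvBody g k (g.length + 1)) st

def pvUnwind (g : List (List Int)) (k : Int) : List (Int × Nat) → List Bool × List Int → List Bool × List Int
  | [], st => st
  | (node, i) :: rest, st => pvUnwind g k rest (pvNF g k node i st)

def pvMu (g : List (List Int)) (stack : List (Int × Nat)) (v : List Bool) : Nat :=
  v.count false * (pvDeg g + 2) + (stack.map (fun p => (pvRow g p.1).length - p.2 + 1)).sum

def pvStackOK (g : List (List Int)) (stack : List (Int × Nat)) : Prop :=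
  ∀ p ∈ stack, -(g.length : Int) ≤ p.1 ∧ p.1 < (g.length : Int) ∧ p.2 ≤ (pvRow g p.1).length

theorem pvDfsA_succ (g : List (List Int)) (k : Int) (f : Nat) (node : Int) (v : List Bool) (s : List Int) :
    pvDfsA g k (f + 1) node v s =
      (if ((s ++ [node]).length : Int) = k then (pvMark v node, s ++ [node])
       else (pvRow g node).foldl (pvBody g k f) (pvMark v node, s ++ [node])) := by
  simp only [pvDfsA]
  rfl

-- Python's index rule for -len ≤ x < len: wrap negatives
def pvIdx (n : Nat) (x : Int) : Nat := if 0 ≤ x then x.toNat else n - (-x).toNat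

theorem pvIdx_lt (n : Nat) {x : Int} (h0 : -(n : Int) ≤ x) (h1 : x < (n : Int)) :
    pvIdx n x < n := by
  unfold pvIdx; split <;> omega

theorem pvIdx?_eq (n : Nat) {x : Int} (h0 : -(n : Int) ≤ x) (h1 : x < (n : Int)) :
    PySem.List.pyIdx? n x = some (pvIdx n x) := by
  unfold PySem.List.pyIdx? pvIdx
  split_ifs with h1
  · rfl
  · rfl

theorem pvGetD_wrap {α : Type} (xs : List α) (d : α) {x : Int} (h0 : -(xs.length : Int) ≤ x)
    (h1 : x < (xs.length : Int)) :
    PySem.List.pyGetD xs x d = xs[pvIdx xs.length x]'(pvIdx_lt _ h0 h1) := by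
  unfold PySem.List.pyGetD PySem.List.pyGet?
  rw [pvIdx?_eq _ h0 h1]
  simp [List.getElem?_eq_getElem (pvIdx_lt xs.length h0 h1)]

theorem pvSetD_wrap {α : Type} (xs : List α) (val : α) {x : Int} (h0 : -(xs.length : Int) ≤ x)
    (h1 : x < (xs.length : Int)) :
    PySem.List.pySetD xs x val = xs.set (pvIdx xs.length x) val := by
  unfold PySem.List.pySetD PySem.List.pySet?
  rw [pvIdx?_eq _ h0 h1]
  rfl

theorem pvRow_mem (g : List (List Int)) {x : Int} (h0 : -(g.length : Int) ≤ x)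
    (h1 : x < (g.length : Int)) : pvRow g x ∈ g := by
  rw [pvRow, pvGetD_wrap g [] h0 h1]
  exact g.getElem_mem _

theorem pvVis_eq (v : List Bool) {x : Int} (h0 : -(v.length : Int) ≤ x) (h1 : x < (v.length : Int)) :
    pvVis v x = v[pvIdx v.length x]'(pvIdx_lt _ h0 h1) := pvGetD_wrap v false h0 h1

theorem pvMark_eq (v : List Bool) {x : Int} (h0 : -(v.length : Int) ≤ x) (h1 : x < (v.length : Int)) :
    pvMark v x = v.set (pvIdx v.length x) true := pvSetD_wrap v true h0 h1

theorem pvMark_length (v : List Bool) (x : Int) : (pvMark v x).length = v.length :=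
  PySem.List.length_pySetD v x true

theorem cnt_set_le (v : List Bool) (j : Nat) : (v.set j true).count false ≤ v.count false := by
  by_cases h : j < v.length
  · rw [List.count_set h]; split <;> split <;> simp_all
  · rw [List.set_eq_of_length_le (by omega)]

theorem cnt_mark_le (v : List Bool) {x : Int} (h0 : -(v.length : Int) ≤ x)
    (h1 : x < (v.length : Int)) : (pvMark v x).count false ≤ v.count false := by
  rw [pvMark_eq v h0 h1]; exact cnt_set_le v _

theorem cnt_mark_unvisited (v : List Bool) {x : Int} (h0 : -(v.length : Int) ≤ x)
    (h1 : x < (v.length : Int)) (hx : pvVis v x = false) :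
    (pvMark v x).count false + 1 = v.count false := by
  rw [pvMark_eq v h0 h1]
  rw [pvVis_eq v h0 h1] at hx
  have hj : pvIdx v.length x < v.length := pvIdx_lt _ h0 h1
  rw [List.count_set hj]
  have hmem : false ∈ v := hx ▸ v.getElem_mem hj
  have hpos : 0 < v.count false := List.count_pos_iff.mpr hmem
  simp [hx]
  omega

theorem cnt_le_len (v : List Bool) : v.count false ≤ v.length := List.count_le_length

theorem pvDeg_ge (g : List (List Int)) {row : List Int} (h : row ∈ g) : row.length ≤ pvDeg g := by
  induction g with
  | nil => simp at h
  | cons r t ih =>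
    have hc : pvDeg (r :: t) = max r.length (pvDeg t) := rfl
    rcases List.mem_cons.mp h with h | h
    · subst h; rw [hc]; exact le_max_left _ _
    · exact le_trans (ih h) (hc ▸ le_max_right _ _)

-- invariant of A's neighbour loop: visited-length preserved, unvisited count does not grow
theorem pvFoldA_inv (g : List (List Int)) (k : Int) (f : Nat)
    (IH : ∀ (node : Int) (v : List Bool) (s : List Int), pvGood g → v.length = g.length →
      -(g.length : Int) ≤ node → node < (g.length : Int) →
      (pvDfsA g k f node v s).1.count false ≤ v.count false ∧ (pvDfsA g k f node v s).1.length = v.length)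
    (hg : pvGood g) :
    ∀ (l : List Int), (∀ x ∈ l, -(g.length : Int) ≤ x ∧ x < (g.length : Int)) →
      ∀ st : List Bool × List Int, st.1.length = g.length →
      (l.foldl (pvBody g k f) st).1.count false ≤ st.1.count false ∧
      (l.foldl (pvBody g k f) st).1.length = st.1.length := by
  intro l
  induction l with
  | nil => intro _ st h; simp [h]
  | cons nb t ih =>
    intro hl st hst
    have hnb := hl nb (by simp)
    have step : (pvBody g k f st nb).1.count false ≤ st.1.count false ∧
        (pvBody g k f st nb).1.length = st.1.length := by
      rw [pvBody]
      split
      · exact IH nb st.1 st.2 hg hst hnb.1 hnb.2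
      · exact ⟨le_refl _, rfl⟩
    have := ih (fun x hx => hl x (by simp [hx])) (pvBody g k f st nb) (step.2.trans hst)
    simp only [List.foldl_cons]
    exact ⟨this.1.trans step.1, this.2.trans step.2⟩

theorem pvDfsA_inv (g : List (List Int)) (k : Int) :
    ∀ (f : Nat) (node : Int) (v : List Bool) (s : List Int), pvGood g → v.length = g.length →
      -(g.length : Int) ≤ node → node < (g.length : Int) →
      (pvDfsA g k f node v s).1.count false ≤ v.count false ∧ (pvDfsA g k f node v s).1.length = v.length := by
  intro f
  induction f with
  | zero => intro node v s _ _ _ _; simp [pvDfsA]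
  | succ f ih =>
    intro node v s hg hv h0 h1
    rw [pvDfsA_succ]
    split
    · exact ⟨cnt_mark_le v (by omega) (by omega), pvMark_length v node⟩
    · have hrow : ∀ x ∈ pvRow g node, -(g.length : Int) ≤ x ∧ x < (g.length : Int) :=
        hg _ (pvRow_mem g h0 h1)
      have := pvFoldA_inv g k f ih hg (pvRow g node) hrow (pvMark v node, s ++ [node])
        (by simp [pvMark_length, hv])
      exact ⟨this.1.trans (cnt_mark_le v (by omega) (by omega)), this.2.trans (pvMark_length v node)⟩

-- A's dfs does not depend on the fuel once the fuel exceeds the number of unvisited nodes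
theorem pvDfsA_fuel (g : List (List Int)) (k : Int) :
    ∀ (f1 f2 : Nat) (node : Int) (v : List Bool) (s : List Int), pvGood g → v.length = g.length →
      -(g.length : Int) ≤ node → node < (g.length : Int) → pvVis v node = false →
      v.count false < f1 → v.count false < f2 →
      pvDfsA g k f1 node v s = pvDfsA g k f2 node v s := by
  intro f1
  induction f1 with
  | zero => intro f2 node v s _ _ _ _ _ h _; omega
  | succ a iha =>
    intro f2 node v s hg hv h0 h1 hnv ha hf2
    match f2, hf2 with
    | b + 1, hf2 =>
      rw [pvDfsA_succ, pvDfsA_succ]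
      split
      · rfl
      · have hcnt : (pvMark v node).count false + 1 = v.count false := cnt_mark_unvisited v (by omega) (by omega) hnv
        have hrow : ∀ x ∈ pvRow g node, -(g.length : Int) ≤ x ∧ x < (g.length : Int) := hg _ (pvRow_mem g h0 h1)
        -- congruence of the two folds
        suffices hsuf : ∀ (l : List Int), (∀ x ∈ l, -(g.length : Int) ≤ x ∧ x < (g.length : Int)) →
            ∀ st : List Bool × List Int, st.1.length = g.length →
            st.1.count false < a → st.1.count false < b →
            l.foldl (pvBody g k a) st = l.foldl (pvBody g k b) st by
          refine hsuf _ hrow (pvMark v node, s ++ [node]) ?_ ?_ ?_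
          · show (pvMark v node).length = g.length
            rw [pvMark_length]; exact hv
          · show (pvMark v node).count false < a
            omega
          · show (pvMark v node).count false < b
            omega
        intro l
        induction l with
        | nil => intro _ st _ _ _; rfl
        | cons nb t iht =>
          intro hl st hst hsa hsb
          have hnb := hl nb (by simp)
          have hstep : pvBody g k a st nb = pvBody g k b st nb := by
            rw [pvBody, pvBody]
            split
            · next hcond =>
              exact iha b nb st.1 st.2 hg hst hnb.1 hnb.2 hcond.1 hsa hsb
            · rfl
          have hinv := pvDfsA_inv g k a nb st.1 st.2 hg hst hnb.1 hnb.2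
          simp only [List.foldl_cons, hstep]
          apply iht (fun x hx => hl x (by simp [hx])) (pvBody g k b st nb)
          · rw [← hstep, pvBody]; split
            · exact hinv.2.trans hst
            · exact hst
          · rw [← hstep, pvBody]; split
            · exact lt_of_le_of_lt hinv.1 hsa
            · exact hsa
          · rw [← hstep, pvBody]; split
            · exact lt_of_le_of_lt hinv.1 hsb
            · exact hsb

theorem pvNF_full (g : List (List Int)) (k : Int) (node : Int) (i : Nat)
    (st : List Bool × List Int) (hk : k ≤ (st.2.length : Int)) : pvNF g k node i st = st := by
  rw [pvNF]
  generalize (pvRow g node).drop i = l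
  induction l generalizing st with
  | nil => rfl
  | cons nb t ih =>
    simp only [List.foldl_cons]
    have : pvBody g k (g.length + 1) st nb = st := by
      rw [pvBody]; split
      · next hcond => exact absurd hcond.2.1 (by omega)
      · rfl
    rw [this]; exact ih st hk

-- unfolding A's dfs into the canonical-fuel neighbour fold
theorem pvDfsA_unfold (g : List (List Int)) (k : Int) (f : Nat) (node : Int) (v : List Bool)
    (s : List Int) (hg : pvGood g) (hv : v.length = g.length) (h0 : -(g.length : Int) ≤ node)
    (h1 : node < (g.length : Int)) (hnv : pvVis v node = false) (hf : v.count false < f)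
    (_hs : (s.length : Int) < k) :
    pvDfsA g k f node v s = pvNF g k node 0 (pvMark v node, s ++ [node]) := by
  match f, hf with
  | m + 1, hf =>
    rw [pvDfsA_succ, pvNF]
    simp only [List.drop_zero]
    have hcnt : (pvMark v node).count false + 1 = v.count false := cnt_mark_unvisited v (by omega) (by omega) hnv
    split
    · next heq =>
      symm
      have : pvNF g k node 0 (pvMark v node, s ++ [node]) = (pvMark v node, s ++ [node]) :=
        pvNF_full g k node 0 _ (by simp at heq ⊢; omega)
      rw [pvNF] at this; simpa using this
    · -- fold congruence m vs g.length+1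
      have hrow : ∀ x ∈ pvRow g node, -(g.length : Int) ≤ x ∧ x < (g.length : Int) := hg _ (pvRow_mem g h0 h1)
      suffices hsuf : ∀ (l : List Int), (∀ x ∈ l, -(g.length : Int) ≤ x ∧ x < (g.length : Int)) →
          ∀ st : List Bool × List Int, st.1.length = g.length →
          st.1.count false < m →
          l.foldl (pvBody g k m) st = l.foldl (pvBody g k (g.length + 1)) st by
        refine hsuf _ hrow (pvMark v node, s ++ [node]) ?_ ?_
        · show (pvMark v node).length = g.length
          rw [pvMark_length]; exact hv
        · show (pvMark v node).count false < m
          omega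
      intro l
      induction l with
      | nil => intro _ st _ _; rfl
      | cons nb t iht =>
        intro hl st hst hsm
        have hnb := hl nb (by simp)
        have hstep : pvBody g k m st nb = pvBody g k (g.length + 1) st nb := by
          rw [pvBody, pvBody]
          split
          · next hcond =>
            exact pvDfsA_fuel g k m (g.length + 1) nb st.1 st.2 hg hst hnb.1 hnb.2 hcond.1 hsm
              (by have := cnt_le_len st.1; omega)
          · rfl
        have hinv := pvDfsA_inv g k m nb st.1 st.2 hg hst hnb.1 hnb.2
        simp only [List.foldl_cons, hstep]
        apply iht (fun x hx => hl x (by simp [hx])) (pvBody g k (g.length + 1) st nb)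
        · rw [← hstep, pvBody]; split
          · exact hinv.2.trans hst
          · exact hst
        · rw [← hstep, pvBody]; split
          · exact lt_of_le_of_lt hinv.1 hsm
          · exact hsm

theorem pvUnwind_full (g : List (List Int)) (k : Int) (stack : List (Int × Nat))
    (st : List Bool × List Int) (hk : k ≤ (st.2.length : Int)) : pvUnwind g k stack st = st := by
  induction stack with
  | nil => rfl
  | cons p rest ih =>
    obtain ⟨node, i⟩ := p
    rw [pvUnwind, pvNF_full g k node i st hk]
    exact ih

-- the stack machine computes the unwinding of its stack
theorem pvDfsB_main (g : List (List Int)) (k : Int) :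
    ∀ (fB : Nat) (stack : List (Int × Nat)) (v : List Bool) (s : List Int), pvGood g →
      v.length = g.length → pvStackOK g stack → pvMu g stack v < fB →
      pvDfsB g k fB stack v s = pvUnwind g k stack (v, s) := by
  intro fB
  induction fB with
  | zero => intro stack v s _ _ _ h; omega
  | succ f ih =>
    intro stack v s hg hv hok hmu
    match stack with
    | [] => rfl
    | (node, i) :: rest =>
      have hnode : -(g.length : Int) ≤ node ∧ node < (g.length : Int) ∧ i ≤ (pvRow g node).length :=
        hok (node, i) (by simp)
      simp only [pvDfsB, pvUnwind]
      split
      · next hk =>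
        split
        · next hi =>
          -- pop: i = (pvRow g node).length, pvNF is a fold over []
          have hnf : pvNF g k node i (v, s) = (v, s) := by
            rw [pvNF, List.drop_eq_nil_of_le (by omega), List.foldl_nil]
          rw [hnf]
          apply ih rest v s hg hv (fun p hp => hok p (by simp [hp]))
          have : pvMu g ((node, i) :: rest) v = pvMu g rest v + ((pvRow g node).length - i + 1) := by
            simp [pvMu]; ring
          omega
        · next hi =>
          have hilt : i < (pvRow g node).length := by omega
          have hnb : (pvRow g node).getD i 0 = (pvRow g node)[i] := List.getD_eq_getElem _ _ hilt
          have hnbv : -(g.length : Int) ≤ (pvRow g node)[i] ∧ (pvRow g node)[i] < (g.length : Int) :=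
            hg _ (pvRow_mem g hnode.1 hnode.2.1) _ (List.getElem_mem hilt)
          have hdrop : (pvRow g node).drop i = (pvRow g node)[i] :: (pvRow g node).drop (i + 1) :=
            List.drop_eq_getElem_cons hilt
          have hdeg : (pvRow g ((pvRow g node)[i])).length ≤ pvDeg g :=
            pvDeg_ge g (pvRow_mem g hnbv.1 hnbv.2)
          have hdegnode : (pvRow g node).length ≤ pvDeg g := pvDeg_ge g (pvRow_mem g hnode.1 hnode.2.1)
          have hmusplit : pvMu g ((node, i) :: rest) v =
              v.count false * (pvDeg g + 2) + (((pvRow g node).length - i + 1) +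
                (rest.map (fun p => (pvRow g p.1).length - p.2 + 1)).sum) := by
            simp [pvMu]
          split
          · next hcond =>
            -- push
            rw [hnb] at hcond ⊢
            set nb := (pvRow g node)[i] with hnbdef
            have hcnt : (pvMark v nb).count false + 1 = v.count false :=
              cnt_mark_unvisited v (by omega) (by omega) hcond.1
            have hIH := ih ((nb, 0) :: (node, i + 1) :: rest) (pvMark v nb) (s ++ [nb]) hg
              (by rw [pvMark_length]; exact hv)
              (by
                intro p hp
                rcases List.mem_cons.mp hp with hp | hp
                · subst hp; exact ⟨hnbv.1, hnbv.2, Nat.zero_le _⟩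
                rcases List.mem_cons.mp hp with hp | hp
                · subst hp
                  exact ⟨hnode.1, hnode.2.1, show i + 1 ≤ (pvRow g node).length by omega⟩
                · exact hok p (List.mem_cons_of_mem _ hp))
              (by
                have hmunew : pvMu g ((nb, 0) :: (node, i + 1) :: rest) (pvMark v nb) =
                    (pvMark v nb).count false * (pvDeg g + 2) +
                    (((pvRow g nb).length - 0 + 1) + (((pvRow g node).length - (i + 1) + 1) +
                      (rest.map (fun p => (pvRow g p.1).length - p.2 + 1)).sum)) := by
                  simp [pvMu]
                rw [hmunew]
                rw [hmusplit] at hmu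
                have h2 : (pvMark v nb).count false * (pvDeg g + 2) + (pvDeg g + 2) =
                    v.count false * (pvDeg g + 2) := by
                  rw [← hcnt]; ring
                omega)
            rw [hIH, pvUnwind, pvUnwind]
            congr 1
            -- pvNF node i (v,s) = pvNF node (i+1) (pvNF nb 0 (mark, s++[nb]))
            have hbody : pvBody g k (g.length + 1) (v, s) nb =
                pvNF g k nb 0 (pvMark v nb, s ++ [nb]) := by
              rw [pvBody]
              rw [if_pos (show pvVis (v, s).1 nb = false ∧ ((v, s).2.length : Int) < k ∧
                    pvAllIn g (v, s).2 nb = true from ⟨hcond.1, hk, hcond.2⟩)]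
              exact pvDfsA_unfold g k (g.length + 1) nb v s hg hv hnbv.1 hnbv.2 hcond.1
                (by have := cnt_le_len v; omega) hk
            have hsplit : pvNF g k node i (v, s) =
                List.foldl (pvBody g k (g.length + 1)) (pvBody g k (g.length + 1) (v, s) nb)
                  ((pvRow g node).drop (i + 1)) := by
              rw [pvNF, hdrop, List.foldl_cons]
            rw [hsplit, hbody]
            rfl
          · next hcond =>
            -- skip this neighbour
            rw [hnb] at hcond
            have hIH := ih ((node, i + 1) :: rest) v s hg hv
              (by
                intro p hp
                rcases List.mem_cons.mp hp with hp | hp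
                · subst hp
                  exact ⟨hnode.1, hnode.2.1, show i + 1 ≤ (pvRow g node).length by omega⟩
                · exact hok p (List.mem_cons_of_mem _ hp))
              (by
                have : pvMu g ((node, i + 1) :: rest) v =
                    v.count false * (pvDeg g + 2) + (((pvRow g node).length - (i + 1) + 1) +
                      (rest.map (fun p => (pvRow g p.1).length - p.2 + 1)).sum) := by
                  simp [pvMu]
                rw [this]; rw [hmusplit] at hmu; omega)
            rw [hIH, pvUnwind]
            congr 1
            have hbody : pvBody g k (g.length + 1) (v, s) ((pvRow g node)[i]) = (v, s) := by
              rw [pvBody]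
              rw [if_neg]
              intro hcc
              exact hcond ⟨hcc.1, hcc.2.2⟩
            have hsplit : pvNF g k node i (v, s) =
                List.foldl (pvBody g k (g.length + 1))
                  (pvBody g k (g.length + 1) (v, s) ((pvRow g node)[i]))
                  ((pvRow g node).drop (i + 1)) := by
              rw [pvNF, hdrop, List.foldl_cons]
            rw [hsplit, hbody]
            rfl
      · next hk =>
        -- subgraph already full
        symm
        have h1 : pvNF g k node i (v, s) = (v, s) :=
          pvNF_full g k node i (v, s) (show (k : Int) ≤ (s.length : Int) by omega)
        rw [h1]
        exact pvUnwind_full g k rest (v, s) (show (k : Int) ≤ (s.length : Int) by omega)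

-- the two dfs implementations agree from any fresh start node
theorem pvDfs_eq (g : List (List Int)) (k : Int) (start : Int) (v : List Bool)
    (hg : pvGood g) (hv : v.length = g.length) (h0 : 0 ≤ start) (h1 : start < (g.length : Int))
    (hnv : pvVis v start = false) (hkpos : 0 < k) :
    pvDfsB g k (pvFuelB g) [(start, 0)] (pvMark v start) [start] =
      pvDfsA g k (g.length + 1) start v [] := by
  have hdeg : (pvRow g start).length ≤ pvDeg g := pvDeg_ge g (pvRow_mem g (by omega) h1)
  have hcm : (pvMark v start).count false ≤ v.count false := cnt_mark_le v (by omega) (by omega)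
  have hcl : v.count false ≤ g.length := hv ▸ cnt_le_len v
  rw [pvDfsB_main g k (pvFuelB g) [(start, 0)] (pvMark v start) [start] hg
    (by rw [pvMark_length]; exact hv)
    (by intro p hp; simp at hp; subst hp; exact ⟨by omega, h1, Nat.zero_le _⟩)
    (by
      have : pvMu g [(start, 0)] (pvMark v start) =
          (pvMark v start).count false * (pvDeg g + 2) + ((pvRow g start).length - 0 + 1) := by
        simp [pvMu]
      rw [this, pvFuelB]
      calc (pvMark v start).count false * (pvDeg g + 2) + ((pvRow g start).length - 0 + 1)
          ≤ g.length * (pvDeg g + 2) + (pvDeg g + 1) :=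
            Nat.add_le_add (Nat.mul_le_mul_right _ (by omega)) (by omega)
        _ < (g.length + 2) * (pvDeg g + 2) := by
            rw [Nat.add_mul]
            exact Nat.add_lt_add_left (by omega : pvDeg g + 1 < 2 * (pvDeg g + 2)) _)]
  rw [pvUnwind, pvUnwind]
  rw [pvDfsA_unfold g k (g.length + 1) start v [] hg hv (by omega) h1 hnv (by omega) (by simpa using hkpos)]
  rfl

theorem pvFind_eq (v : List Bool) (s : Int) : pvFindB v s = pvFindA v s := by
  rw [pvFindB, pvFindA]
  split
  · exact pvFind_eq v (s + 1)
  · rfl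
termination_by ((v.length : Int) - s).toNat
decreasing_by
  next _h _ => omega

theorem pvFindA_spec (v : List Bool) (s : Int) (h0 : 0 ≤ s) (hsn : s ≤ (v.length : Int)) :
    s ≤ pvFindA v s ∧ pvFindA v s ≤ (v.length : Int) ∧
      (pvFindA v s < (v.length : Int) → pvVis v (pvFindA v s) = false) := by
  rw [pvFindA]
  split
  · next h =>
    have := pvFindA_spec v (s + 1) (by omega) (by omega)
    exact ⟨by omega, this.2.1, this.2.2⟩
  · next h =>
    refine ⟨le_refl s, hsn, fun hlt => ?_⟩
    cases hb : pvVis v s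
    · rfl
    · exact absurd ⟨hlt, hb⟩ h
termination_by ((v.length : Int) - s).toNat
decreasing_by
  next _h _ => omega

theorem pvOuter_eq (g : List (List Int)) (k : Int) :
    ∀ (is : List Int) (v : List Bool) (subs : List (List Int)), pvGood g →
      v.length = g.length → 0 < k → (∀ i ∈ is, 0 ≤ i ∧ i * k < (g.length : Int)) →
      pvOuterB g k is v subs = pvOuterA g k is v subs := by
  intro is
  induction is with
  | nil => intro v subs _ _ _ _; rfl
  | cons i rest ih =>
    intro v subs hg hv hk hb
    have hi := hb i (by simp)
    rw [pvOuterA, pvOuterB, pvFind_eq]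
    have hspec := pvFindA_spec v (i * k) (mul_nonneg hi.1 hk.le) (by omega)
    split
    · rfl
    · next hne =>
      have hstartlt : pvFindA v (i * k) < (g.length : Int) := by
        rw [hv] at hspec
        rcases lt_or_eq_of_le hspec.2.1 with h | h
        · exact h
        · exact absurd h hne
      have hstart0 : 0 ≤ pvFindA v (i * k) := le_trans (mul_nonneg hi.1 hk.le) hspec.1
      have hunv : pvVis v (pvFindA v (i * k)) = false := hspec.2.2 (hv ▸ hstartlt)
      rw [pvDfs_eq g k (pvFindA v (i * k)) v hg hv hstart0 hstartlt hunv hk]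
      exact ih _ _ hg ((pvDfsA_inv g k (g.length + 1) _ v [] hg hv (by omega) hstartlt).2.trans hv)
        hk (fun j hj => hb j (by simp [hj]))

theorem pvFillA_full (g : List (List Int)) (k : Int) (sg : List Int) (rem : List Int)
    (hk : k ≤ (sg.length : Int)) : pvFillA g k sg rem = (sg, rem) := by
  cases rem with
  | nil => rfl
  | cons node rest => rw [pvFillA, if_neg (by omega)]

theorem pvFixA_nil (g : List (List Int)) (k : Int) : ∀ subs, pvFixA g k subs [] = subs := by
  intro subs
  induction subs with
  | nil => rfl
  | cons sg rest ih => rw [pvFixA]; simp only [pvFillA]; rw [ih]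

theorem pvSkip_eq (g : List (List Int)) (k : Int) :
    ∀ (todo done : List (List Int)) (rem : List Int),
      (pvSkip k done todo).1 ++ pvFixA g k (pvSkip k done todo).2 rem =
        done ++ pvFixA g k todo rem := by
  intro todo
  induction todo with
  | nil => intro done rem; simp [pvSkip, pvFixA]
  | cons sg t ih =>
    intro done rem
    rw [pvSkip]
    split
    · next hk =>
      rw [ih (done ++ [sg]) rem, pvFixA]
      rw [pvFillA_full g k sg rem hk]
      simp
    · rfl

theorem pvSkip_head_lt (k : Int) :
    ∀ (todo done : List (List Int)) (sg : List Int) (t : List (List Int)),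
      (pvSkip k done todo).2 = sg :: t → (sg.length : Int) < k := by
  intro todo
  induction todo with
  | nil => intro done sg t h; simp [pvSkip] at h
  | cons a u ih =>
    intro done sg t h
    rw [pvSkip] at h
    split at h
    · exact ih _ _ _ h
    · next hna =>
      obtain ⟨h1, h2⟩ : a = sg ∧ u = t := by simpa using h
      subst h1; omega

theorem pvFix_eq (g : List (List Int)) (k : Int) :
    ∀ (rem : List Int) (done todo : List (List Int)),
      pvFixB g k rem done todo = done ++ pvFixA g k todo rem := by
  intro rem
  induction rem with
  | nil => intro done todo; rw [pvFixB, pvFixA_nil]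
  | cons node rest ih =>
    intro done todo
    rw [pvFixB]
    rw [← pvSkip_eq g k todo done (node :: rest)]
    split
    · next heq => rw [heq, pvFixA]; simp
    · next sg t heq =>
      have hlt : (sg.length : Int) < k := pvSkip_head_lt k todo done sg t heq
      rw [heq, pvFixA]
      simp only [pvFillA]
      rw [if_pos hlt]
      split
      · next hall => rw [ih, pvFixA]
      · next hall => rw [ih, pvFixA]

-- with subgraph_size = 1 both dfs variants stop immediately after taking the start node
theorem pvDfs_eq_one (g : List (List Int)) (start : Int) (v : List Bool) :
    pvDfsB g 1 (pvFuelB g) [(start, 0)] (pvMark v start) [start] =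
      pvDfsA g 1 (g.length + 1) start v [] := by
  have h4 : pvFuelB g = (pvFuelB g - 1) + 1 := by
    have : 2 * 2 ≤ (g.length + 2) * (pvDeg g + 2) := Nat.mul_le_mul (by omega) (by omega)
    unfold pvFuelB
    omega
  rw [h4, pvDfsA_succ]
  simp [pvDfsB]

theorem pvOuter_eq_one (g : List (List Int)) :
    ∀ (is : List Int) (v : List Bool) (subs : List (List Int)),
      pvOuterB g 1 is v subs = pvOuterA g 1 is v subs := by
  intro is
  induction is with
  | nil => intro v subs; rfl
  | cons i rest ih =>
    intro v subs
    rw [pvOuterA, pvOuterB, pvFind_eq]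
    split
    · rfl
    · rw [pvDfs_eq_one]
      exact ih _ _

theorem pvNegDiv (n k : Int) (hn : 0 ≤ n) (hk : k < 0) : PySem.Int.floordiv n k ≤ 0 := by
  have h1 := PySem.Int.floordiv_mul_add_mod n k
  have h2 := PySem.Int.mod_neg_bounds n hk
  by_contra h
  have h3 : 0 < PySem.Int.floordiv n k := by omega
  nlinarith

-- ===== VERDICT (by name: the statement is the Claim_ definition above) =====
theorem partition_graph_spec : Claim_equal_partition_graph := by
  intro g k hdom hpre
  unfold Spec_partition_graph
  simp only [partition_graph, partition_graph_alt]
  obtain ⟨hk0, hgd⟩ := hpre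
  rw [pvFix_eq g k]
  simp only [List.nil_append]
  rcases hgd with hneg | hone | hg
  · rw [PySem.List.pyRange_one_eq_nil
      (by have := pvNegDiv (g.length : Int) k (by positivity) hneg; omega)]
    rfl
  · subst hone
    rw [pvOuter_eq_one]
  by_cases hc : 0 < PySem.Int.floordiv (g.length : Int) k
  · -- count positive: k must be positive
    have hkpos : 0 < k := by
      rcases lt_trichotomy k 0 with h | h | h
      · exact absurd hc (by have := pvNegDiv (g.length : Int) k (by positivity) h; omega)
      · exact absurd h hk0
      · exact h
    have hck : PySem.Int.floordiv (g.length : Int) k * k ≤ (g.length : Int) := by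
      have h1 := PySem.Int.floordiv_mul_add_mod (g.length : Int) k
      have h2 := PySem.Int.mod_nonneg (g.length : Int) hkpos
      omega
    rw [pvOuter_eq g k _ _ _ hg (by simp) hkpos]
    intro i hi
    rw [PySem.List.mem_pyRange_one] at hi
    refine ⟨hi.1, ?_⟩
    have : i * k ≤ (PySem.Int.floordiv (g.length : Int) k - 1) * k := by
      exact mul_le_mul_of_nonneg_right (by omega) (by omega)
    nlinarith
  · rw [PySem.List.pyRange_one_eq_nil (by omega)]
    rfl
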